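-- pv_equiv track=rewrite | github.com/faberAndro/Experiments | Some_Maths_and_Languages_toy_functions/Morse_code_conversion.py | translate_from_English_to_Morse
-- ===== SOURCE A (Python) =====
-- morseDic = {
--   " ": " ",
--   "'": ".----.",
--   "(": "-.--.-",
--   ")": "-.--.-",
--   ",": "--..--",
--   "-": "-....-",
--   ".": ".-.-.-",
--   "/": "-..-.",
--   "0": "-----",
--   "1": ".----",
--   "2": "..---",
--   "3": "...--",
--   "4": "....-",
--   "5": ".....",
--   "6": "-....",
--   "7": "--...",
--   "8": "---..",
--   "9": "----.",
--   ":": "---...",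
--   ";": "-.-.-.",
--   "?": "..--..",
--   "!": "-.-.--",
--   "A": ".-",
--   "B": "-...",
--   "C": "-.-.",
--   "D": "-..",
--   "E": ".",
--   "F": "..-.",
--   "G": "--.",
--   "H": "....",
--   "I": "..",
--   "J": ".---",
--   "K": "-.-",
--   "L": ".-..",
--   "M": "--",
--   "N": "-.",
--   "O": "---",
--   "P": ".--.",
--   "Q": "--.-",
--   "R": ".-.",
--   "S": "...",
--   "T": "-",
--   "U": "..-",
--   "V": "...-",
--   "W": ".--",
--   "X": "-..-",
--   "Y": "-.--",
--   "Z": "--..",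
--   "_": "..--.-"
-- }   # define an English to Morse dict
--
-- def translate_from_English_to_Morse(text_to_be_translated: str) -> str:
--     # translate from English to Morse
--     word_0 = text_to_be_translated    # input an english word
--     word = word_0.upper()
--     output = ""
--     for x in word:
--         if x not in morseDic:
--             return "Invalid Input"
--         else:
--             y = morseDic.get(x)
--             output += y + " "
--     return output
-- ===== SOURCE B (Python) =====
-- # Morse codes stored as bit-packed integers: a leading 1 sentinel, then one bit
-- # per symbol (dash=1, dot=0), read most-significant-first.  0 encodes the word
-- # gap (a literal space).  Decoding unpacks the bits back-to-front.
-- MORSE_BITS = {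
--     ' ': 0, "'": 94, '(': 109, ')': 109, ',': 115, '-': 97, '.': 85, '/': 50,
--     '0': 63, '1': 47, '2': 39, '3': 35, '4': 33, '5': 32, '6': 48, '7': 56,
--     '8': 60, '9': 62, ':': 120, ';': 106, '?': 76, '!': 107, 'A': 5, 'B': 24,
--     'C': 26, 'D': 12, 'E': 2, 'F': 18, 'G': 14, 'H': 16, 'I': 4, 'J': 23,
--     'K': 13, 'L': 20, 'M': 7, 'N': 6, 'O': 15, 'P': 22, 'Q': 29, 'R': 10,
--     'S': 8, 'T': 3, 'U': 9, 'V': 17, 'W': 11, 'X': 25, 'Y': 27, 'Z': 28,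
--     '_': 77,
-- }
--
-- def _decode(n):
--     # unpack a bit-coded Morse letter; 0 is the word gap
--     if n == 0:
--         return ' '
--     sym = ''
--     while n > 1:
--         sym = ('-' if n & 1 else '.') + sym
--         n >>= 1
--     return sym
--
-- def translate_from_English_to_Morse(text_to_be_translated: str) -> str:
--     codes = [MORSE_BITS.get(c) for c in text_to_be_translated.upper()]
--     if None in codes:
--         return 'Invalid Input'
--     return ''.join(_decode(n) + ' ' for n in codes)
-- ===== Notes on version B (the rewrite author's own statement) =====
-- stated objective: alternative
-- what changed: Replaced A's dict-of-code-strings with a table of bit-packed integers (leading-1 sentinel, dash=1/dot=0) decoded by a bit-unpacking loop, and A's interleaved accumulate-or-early-return scan with a staged map-lookups / None-check / join pipeline.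
import Mathlib
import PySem

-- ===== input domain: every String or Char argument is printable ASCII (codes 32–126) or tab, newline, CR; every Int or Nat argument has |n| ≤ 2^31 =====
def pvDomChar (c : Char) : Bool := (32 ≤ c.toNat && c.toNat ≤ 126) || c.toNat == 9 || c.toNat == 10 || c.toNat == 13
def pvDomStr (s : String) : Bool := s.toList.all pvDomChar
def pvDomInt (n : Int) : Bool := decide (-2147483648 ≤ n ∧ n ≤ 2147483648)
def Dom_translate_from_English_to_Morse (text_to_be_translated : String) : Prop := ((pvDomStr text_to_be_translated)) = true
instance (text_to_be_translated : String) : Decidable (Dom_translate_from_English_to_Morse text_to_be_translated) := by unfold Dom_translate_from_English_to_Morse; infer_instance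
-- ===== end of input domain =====

-- B stores Morse codes as bit-packed integers (sentinel-1 then dash=1/dot=0) and decodes the
-- bits back-to-front; different data structure, same values everywhere (objective: alternative).

-- ===== PORT A =====
-- the module-level English→Morse dict; values kept as List Char
def morseDic : PySem.Dict Char (List Char) := PySem.Dict.ofList [
  (' ', " ".toList), ('\'', ".----.".toList), ('(', "-.--.-".toList), (')', "-.--.-".toList),
  (',', "--..--".toList), ('-', "-....-".toList), ('.', ".-.-.-".toList), ('/', "-..-.".toList),
  ('0', "-----".toList), ('1', ".----".toList), ('2', "..---".toList), ('3', "...--".toList),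
  ('4', "....-".toList), ('5', ".....".toList), ('6', "-....".toList), ('7', "--...".toList),
  ('8', "---..".toList), ('9', "----.".toList), (':', "---...".toList), (';', "-.-.-.".toList),
  ('?', "..--..".toList), ('!', "-.-.--".toList), ('A', ".-".toList), ('B', "-...".toList),
  ('C', "-.-.".toList), ('D', "-..".toList), ('E', ".".toList), ('F', "..-.".toList),
  ('G', "--.".toList), ('H', "....".toList), ('I', "..".toList), ('J', ".---".toList),
  ('K', "-.-".toList), ('L', ".-..".toList), ('M', "--".toList), ('N', "-.".toList),
  ('O', "---".toList), ('P', ".--.".toList), ('Q', "--.-".toList), ('R', ".-.".toList),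
  ('S', "...".toList), ('T', "-".toList), ('U', "..-".toList), ('V', "...-".toList),
  ('W', ".--".toList), ('X', "-..-".toList), ('Y', "-.--".toList), ('Z', "--..".toList),
  ('_', "..--.-".toList)]

-- A's loop: early return "Invalid Input" on the first unknown char, else accumulate output += y + " "
def pvGoA (d : PySem.Dict Char (List Char)) : List Char → List Char → String
  | [], output => String.ofList output
  | c :: rest, output =>
    match d.get? c with
    | none => "Invalid Input"            -- 'if x not in morseDic: return "Invalid Input"'
    | some y => pvGoA d rest (output ++ y ++ [' '])

def translate_from_English_to_Morse (text_to_be_translated : String) : String :=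
  pvGoA morseDic (PySem.Chars.upper text_to_be_translated.toList) []

-- ===== PORT B =====
-- Source B's MORSE_BITS: each code as an integer, leading-1 sentinel then dash=1/dot=0; 0 = word gap
def morseBitsItems : List (Char × Int) := [
  (' ', 0), ('\'', 94), ('(', 109), (')', 109), (',', 115), ('-', 97), ('.', 85), ('/', 50),
  ('0', 63), ('1', 47), ('2', 39), ('3', 35), ('4', 33), ('5', 32), ('6', 48), ('7', 56),
  ('8', 60), ('9', 62), (':', 120), (';', 106), ('?', 76), ('!', 107), ('A', 5), ('B', 24),
  ('C', 26), ('D', 12), ('E', 2), ('F', 18), ('G', 14), ('H', 16), ('I', 4), ('J', 23),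
  ('K', 13), ('L', 20), ('M', 7), ('N', 6), ('O', 15), ('P', 22), ('Q', 29), ('R', 10),
  ('S', 8), ('T', 3), ('U', 9), ('V', 17), ('W', 11), ('X', 25), ('Y', 27), ('Z', 28),
  ('_', 77)]

def morseBits : PySem.Dict Char Int := PySem.Dict.ofList morseBitsItems

-- Source B's _decode while-loop; fuel only makes the halving loop total (n.toNat steps always suffice)
def pvDecodeLoop : Nat → Int → List Char → List Char
  | 0, _, sym => sym
  | fuel+1, n, sym =>
    if 1 < n then pvDecodeLoop fuel (n >>> 1) ((if PySem.Int.band n 1 = 1 then '-' else '.') :: sym)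
    else sym

def pvDecode (n : Int) : List Char :=
  if n = 0 then [' '] else pvDecodeLoop n.toNat n []

def translate_from_English_to_Morse_alt (text_to_be_translated : String) : String :=
  let codes := (PySem.Chars.upper text_to_be_translated.toList).map (fun c => morseBits.get? c)
  if codes.contains none then "Invalid Input"
  else String.ofList (codes.flatMap (fun o => pvDecode (o.getD 0) ++ [' ']))

-- ===== PRECONDITION & SPEC =====
def Spec_translate_from_English_to_Morse (text_to_be_translated : String) (out : String) : Prop := out = translate_from_English_to_Morse_alt text_to_be_translated
instance (text_to_be_translated : String) (out : String) : Decidable (Spec_translate_from_English_to_Morse text_to_be_translated out) := by unfold Spec_translate_from_English_to_Morse; infer_instance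

-- ===== CLAIM (what is proved, stated in full; the proofs are below) =====
def Claim_equal_translate_from_English_to_Morse : Prop := ∀ (text_to_be_translated : String), Dom_translate_from_English_to_Morse text_to_be_translated → Spec_translate_from_English_to_Morse text_to_be_translated (translate_from_English_to_Morse text_to_be_translated)

-- ===== LEMMAS AND PROOFS =====
-- the two literal tables agree pointwise: A's dict IS B's dict with every value decoded
set_option maxRecDepth 40000 in
lemma morseDic_eq_map : morseDic =
    PySem.Dict.mk (morseBitsItems.map (fun p => (p.1, pvDecode p.2))) := by decide

lemma get?_mk_map {α β : Type} (f : α → β) (l : List (Char × α)) (c : Char) :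
    (PySem.Dict.mk (l.map (fun p => (p.1, f p.2)))).get? c =
      ((PySem.Dict.mk l).get? c).map f := by
  induction l with
  | nil => simp [PySem.Dict.get?]
  | cons p rest ih =>
    obtain ⟨k, v⟩ := p
    simp only [List.map_cons, PySem.Dict.get?_mk_cons]
    by_cases h : k = c <;> simp [h, ih]

set_option maxRecDepth 40000 in
lemma morseBits_mk : morseBits = PySem.Dict.mk morseBitsItems := by decide

lemma get?_dic_eq (c : Char) : morseDic.get? c = (morseBits.get? c).map pvDecode := by
  rw [morseDic_eq_map, morseBits_mk, get?_mk_map]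

-- A's interleaved loop, characterised: validate-then-translate of the remaining chars
lemma pvGoA_eq (cs acc : List Char) :
    pvGoA morseDic cs acc =
      if cs.all (fun c => (morseBits.get? c).isSome) then
        String.ofList (acc ++ cs.flatMap (fun c => pvDecode ((morseBits.get? c).getD 0) ++ [' ']))
      else "Invalid Input" := by
  induction cs generalizing acc with
  | nil => simp [pvGoA]
  | cons c rest ih =>
    unfold pvGoA
    rw [get?_dic_eq c]
    cases h : morseBits.get? c with
    | none => simp [h]
    | some n => simp [h, ih, List.append_assoc]

lemma contains_none_map (cs : List Char) :
    ((cs.map fun c => morseBits.get? c).contains none) =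
      !(cs.all fun c => (morseBits.get? c).isSome) := by
  induction cs with
  | nil => simp
  | cons c rest ih =>
    simp only [List.map_cons, List.contains_cons, List.all_cons, ih]
    cases h : morseBits.get? c <;> simp [h]

-- ===== VERDICT (by name: the statement is the Claim_ definition above) =====
theorem translate_from_English_to_Morse_spec : Claim_equal_translate_from_English_to_Morse := by
  intro t _
  unfold Spec_translate_from_English_to_Morse translate_from_English_to_Morse
    translate_from_English_to_Morse_alt
  rw [pvGoA_eq]
  simp only [contains_none_map, List.flatMap_map]
  cases h : (PySem.Chars.upper t.toList).all fun c => (morseBits.get? c).isSome <;> simp [h]
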